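-- pv_equiv track=rewrite | github.com/mbaelde/advent-of-code | 2015/day3/main.py | compute_n_houses_delivered_robo
-- ===== SOURCE A (Python) =====
-- from dataclasses import dataclass
-- from typing import Callable, List, NamedTuple
--
-- @dataclass
-- class Position:
--     """
--     Represents a position with coordinates (x, y).
--     """
--
--     x: int = 0
--     y: int = 0
--
--     def step(self, char: str) -> None:
--         """
--         Update the position based on the given character.
--
--         Args:
--             char (str): The character representing the movement direction.
--         """
--         match char:
--             case "^":
--                 self.y += 1
--             case "v":
--                 self.y -= 1
--             case "<":
--                 self.x -= 1
--             case ">":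
--                 self.x += 1
--
--     def __hash__(self) -> int:
--         """
--         Compute the hash of the position.
--
--         Returns:
--             int: The hash value.
--         """
--         return hash((self.x, self.y))
--
--     @property
--     def coordinates(self) -> tuple[int, int]:
--         """
--         Get the coordinates of the position.
--
--         Returns:
--             tuple[int, int]: The (x, y) coordinates.
--         """
--         return (self.x, self.y)
--
-- def compute_n_houses_delivered_robo(input_str: str) -> int:
--     """
--     Compute the number of houses delivered to at least once with Robo-Santa.
--
--     Args:
--         input_str (str): The input string representing movements.
--
--     Returns:
--         int: The number of houses delivered to at least once.
--     """
--     position_santa = Position()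
--     position_robosanta = Position()
--     map_var: List[Position] = [position_santa.coordinates]
--     for i, c in enumerate(input_str):
--         if i % 2 == 0:
--             position_santa.step(c)
--             map_var.append(position_santa.coordinates)
--         else:
--             position_robosanta.step(c)
--             map_var.append(position_robosanta.coordinates)
--     n_houses = len(set(map_var))
--     return n_houses
-- ===== SOURCE B (Python) =====
-- def _visited(moves):
--     x = y = 0
--     seen = {(0, 0)}
--     for c in moves:
--         if c == '^':
--             y += 1
--         elif c == 'v':
--             y -= 1
--         elif c == '<':
--             x -= 1
--         elif c == '>':
--             x += 1
--         seen.add((x, y))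
--     return seen
--
--
-- def compute_n_houses_delivered_robo(input_str: str) -> int:
--     return len(_visited(input_str[0::2]) | _visited(input_str[1::2]))
-- ===== Notes on version B (the rewrite author's own statement) =====
-- stated objective: alternative
-- what changed: Replaced the single interleaved loop with alternating santa/robo state by a parity partition of the input (s[0::2], s[1::2]) followed by two independent walks, each collecting its visited set from (0,0); the answer is the size of the union of the two sets.
import Mathlib
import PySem

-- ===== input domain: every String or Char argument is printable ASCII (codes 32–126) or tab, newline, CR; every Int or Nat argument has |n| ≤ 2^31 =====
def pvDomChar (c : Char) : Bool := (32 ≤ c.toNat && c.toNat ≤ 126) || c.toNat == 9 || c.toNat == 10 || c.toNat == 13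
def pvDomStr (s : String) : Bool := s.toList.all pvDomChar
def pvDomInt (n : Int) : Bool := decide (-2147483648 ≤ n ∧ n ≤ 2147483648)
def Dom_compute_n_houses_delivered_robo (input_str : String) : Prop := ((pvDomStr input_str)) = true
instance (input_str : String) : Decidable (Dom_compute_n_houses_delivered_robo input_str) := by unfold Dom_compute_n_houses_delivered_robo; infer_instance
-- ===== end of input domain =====

-- B replaces A's single interleaved alternating loop by a parity partition of the input
-- into santa/robo move strings, two independent walks, and the union of the two visited sets
-- (objective: alternative decomposition, same O(n) cost).


-- ===== PORT A =====
-- Position.step (A mutates the Position in place; the port threads the pair)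
def pvStepA (p : Int × Int) (c : Char) : Int × Int :=
  match c with
  | '^' => (p.1, p.2 + 1)
  | 'v' => (p.1, p.2 - 1)
  | '<' => (p.1 - 1, p.2)
  | '>' => (p.1 + 1, p.2)
  | _ => p

def compute_n_houses_delivered_robo (input_str : String) : Int :=
  let st := (PySem.List.enumerate input_str.toList 0).foldl
    (fun (st : (Int × Int) × (Int × Int) × List (Int × Int)) ic =>
      if PySem.Int.mod ic.1 2 = 0 then
        let ps := pvStepA st.1 ic.2
        (ps, st.2.1, st.2.2 ++ [ps])
      else
        let pr := pvStepA st.2.1 ic.2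
        (st.1, pr, st.2.2 ++ [pr]))
    ((0, 0), (0, 0), [((0 : Int), (0 : Int))])
  ((PySem.Set.ofList st.2.2).length : Int)

-- ===== PORT B =====
-- B's if/elif chain updating (x, y)
def pvStepB (x y : Int) (c : Char) : Int × Int :=
  if c = '^' then (x, y + 1)
  else if c = 'v' then (x, y - 1)
  else if c = '<' then (x - 1, y)
  else if c = '>' then (x + 1, y)
  else (x, y)

-- _visited(moves): walk from (0,0), seen = {(0,0)} plus every position after a char
def pvVisited (moves : List Char) : PySem.Set (Int × Int) :=
  (moves.foldl
    (fun (st : (Int × Int) × PySem.Set (Int × Int)) c =>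
      let p := pvStepB st.1.1 st.1.2 c
      (p, PySem.Set.add st.2 p))
    ((0, 0), PySem.Set.ofList [((0 : Int), (0 : Int))])).2

def compute_n_houses_delivered_robo_alt (input_str : String) : Int :=
  let santa := (PySem.List.slice? input_str.toList (some 0) none 2).getD []
  let robo := (PySem.List.slice? input_str.toList (some 1) none 2).getD []
  ((PySem.Set.union (pvVisited santa) (pvVisited robo)).length : Int)

-- ===== PRECONDITION & SPEC =====
def Spec_compute_n_houses_delivered_robo (input_str : String) (out : Int) : Prop := out = compute_n_houses_delivered_robo_alt input_str
instance (input_str : String) (out : Int) : Decidable (Spec_compute_n_houses_delivered_robo input_str out) := by unfold Spec_compute_n_houses_delivered_robo; infer_instance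

-- ===== CLAIM (what is proved, stated in full; the proofs are below) =====
def Claim_equal_compute_n_houses_delivered_robo : Prop := ∀ (input_str : String), Dom_compute_n_houses_delivered_robo input_str → Spec_compute_n_houses_delivered_robo input_str (compute_n_houses_delivered_robo input_str)

-- ===== LEMMAS AND PROOFS =====

-- proof-side models
def pvEvens {α : Type} : List α → List α
  | [] => []
  | [a] => [a]
  | a :: _ :: l => a :: pvEvens l

def pvOdds {α : Type} : List α → List α
  | [] => []
  | _ :: l => pvEvens l

def pvTrail (p : Int × Int) : List Char → List (Int × Int)
  | [] => []
  | c :: cs => pvStepA p c :: pvTrail (pvStepA p c) cs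

def pvModelA : List Char → (Int × Int) → (Int × Int) → List (Int × Int) → List (Int × Int)
  | [], _, _, m => m
  | c :: l, p, q, m => pvModelA l q (pvStepA p c) (m ++ [pvStepA p c])

lemma pvStepB_eq (p : Int × Int) (c : Char) : pvStepB p.1 p.2 c = pvStepA p c := by
  unfold pvStepB pvStepA
  split_ifs with h1 h2 h3 h4 <;> first | (subst_vars; rfl) | (split <;> simp_all)

lemma pvEvens_cons {α : Type} (c : α) (l : List α) : pvEvens (c :: l) = c :: pvOdds l := by
  cases l <;> rfl

lemma pvFoldA (l : List Char) : ∀ (k : Int) (p q : Int × Int) (m : List (Int × Int)),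
    (((PySem.List.enumerate l k).foldl
      (fun (st : (Int × Int) × (Int × Int) × List (Int × Int)) ic =>
        if PySem.Int.mod ic.1 2 = 0 then
          let ps := pvStepA st.1 ic.2
          (ps, st.2.1, st.2.2 ++ [ps])
        else
          let pr := pvStepA st.2.1 ic.2
          (st.1, pr, st.2.2 ++ [pr]))
      (p, q, m)).2.2) =
      if PySem.Int.mod k 2 = 0 then pvModelA l p q m else pvModelA l q p m := by
  induction l with
  | nil => intro k p q m; simp [PySem.List.enumerate_nil, pvModelA]
  | cons c l ih =>
    intro k p q m
    rw [PySem.List.enumerate_cons]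
    have hmod : PySem.Int.mod k 2 = k % 2 := PySem.Int.mod_eq_emod_of_pos (by norm_num)
    have hmod1 : PySem.Int.mod (k + 1) 2 = (k + 1) % 2 := PySem.Int.mod_eq_emod_of_pos (by norm_num)
    by_cases h : PySem.Int.mod k 2 = 0
    · have h' : ¬ PySem.Int.mod (k + 1) 2 = 0 := by rw [hmod1]; rw [hmod] at h; omega
      simp only [List.foldl_cons, h, if_pos]
      rw [ih, if_neg h']
      simp [pvModelA]
    · have h' : PySem.Int.mod (k + 1) 2 = 0 := by rw [hmod1]; rw [hmod] at h; omega
      simp only [List.foldl_cons, h, if_false]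
      rw [ih, if_pos h']
      simp [pvModelA]

lemma pvMem_modelA (l : List Char) : ∀ (p q : Int × Int) (m : List (Int × Int)) (y : Int × Int),
    y ∈ pvModelA l p q m ↔ y ∈ m ∨ y ∈ pvTrail p (pvEvens l) ∨ y ∈ pvTrail q (pvOdds l) := by
  induction l with
  | nil => intro p q m y; simp [pvModelA, pvEvens, pvOdds, pvTrail]
  | cons c l ih =>
    intro p q m y
    rw [pvEvens_cons]
    simp only [pvModelA, pvOdds, pvTrail, ih, List.mem_append, List.mem_cons]
    tauto

lemma pvLamB_eq :
    (fun (st : (Int × Int) × PySem.Set (Int × Int)) c =>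
      let p := pvStepB st.1.1 st.1.2 c
      (p, PySem.Set.add st.2 p)) =
    (fun (st : (Int × Int) × PySem.Set (Int × Int)) c =>
      (pvStepA st.1 c, PySem.Set.add st.2 (pvStepA st.1 c))) := by
  funext st c
  simp [pvStepB_eq]

lemma pvVisited_fold_mem (moves : List Char) : ∀ (p : Int × Int) (s : PySem.Set (Int × Int)) (y : Int × Int),
    (y ∈ (moves.foldl
      (fun (st : (Int × Int) × PySem.Set (Int × Int)) c =>
        (pvStepA st.1 c, PySem.Set.add st.2 (pvStepA st.1 c))) (p, s)).2) ↔ y ∈ s ∨ y ∈ pvTrail p moves := by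
  induction moves with
  | nil => intro p s y; simp [pvTrail]
  | cons c cs ih =>
    intro p s y
    rw [List.foldl_cons, ih]
    simp only [PySem.Set.mem_add, pvTrail, List.mem_cons]
    tauto

lemma pvVisited_fold_nodup (moves : List Char) : ∀ (p : Int × Int) (s : PySem.Set (Int × Int)),
    s.Nodup → ((moves.foldl
      (fun (st : (Int × Int) × PySem.Set (Int × Int)) c =>
        (pvStepA st.1 c, PySem.Set.add st.2 (pvStepA st.1 c))) (p, s)).2).Nodup := by
  induction moves with
  | nil => intro p s hs; simpa using hs
  | cons c cs ih =>
    intro p s hs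
    rw [List.foldl_cons]
    exact ih _ _ (PySem.Set.nodup_add _ _ hs)

lemma pvMem_visited (moves : List Char) (y : Int × Int) :
    y ∈ pvVisited moves ↔ y = (0, 0) ∨ y ∈ pvTrail (0, 0) moves := by
  unfold pvVisited
  rw [pvLamB_eq, pvVisited_fold_mem]
  simp [PySem.Set.mem_ofList]

lemma pvVisited_nodup (moves : List Char) : (pvVisited moves).Nodup := by
  unfold pvVisited
  rw [pvLamB_eq]
  exact pvVisited_fold_nodup _ _ _ (PySem.Set.nodup_ofList _)

lemma pvPickEvens {α : Type} : ∀ (xs : List α),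
    List.filterMap (fun k => xs[2 * k]?) (List.range ((xs.length + 1) / 2)) = pvEvens xs := by
  intro xs
  induction xs using pvEvens.induct with
  | case1 => simp [pvEvens]
  | case2 a => simp [pvEvens, List.range_succ]
  | case3 a b l ih =>
    have h1 : ((a :: b :: l).length + 1) / 2 = (l.length + 1) / 2 + 1 := by simp; omega
    rw [h1, List.range_succ_eq_map, List.filterMap_cons, List.filterMap_map]
    have h2 : ((fun k => (a :: b :: l)[2 * k]?) ∘ (· + 1)) = (fun k => l[2 * k]?) := by
      funext k
      simp [Function.comp, Nat.mul_succ, List.getElem?_cons_succ]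
    rw [h2, ih]
    simp [pvEvens]

lemma pvSliceEvens {α : Type} (xs : List α) :
    PySem.List.slice? xs (some 0) none 2 = some (pvEvens xs) := by
  rw [← pvPickEvens]
  simp only [PySem.List.slice?, PySem.List.sliceIndices]
  norm_num
  have hc : (if 0 < xs.length then (((xs.length : Int) + 2 - 1) / 2).toNat else 0) = (xs.length + 1) / 2 := by
    split_ifs with h <;> omega
  rw [hc]
  congr 1

lemma pvSliceOdds {α : Type} (xs : List α) :
    PySem.List.slice? xs (some 1) none 2 = some (pvOdds xs) := by
  cases xs with
  | nil => simp [PySem.List.slice?, PySem.List.sliceIndices, pvOdds]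
  | cons a l =>
    show _ = some (pvEvens l)
    rw [← pvPickEvens]
    simp only [PySem.List.slice?, PySem.List.sliceIndices]
    norm_num
    have hc : (if 0 < l.length then (((l.length : Int) + 2 - 1) / 2).toNat else 0) = (l.length + 1) / 2 := by
      split_ifs with h <;> omega
    rw [hc]
    congr 1
    funext k
    have hk : (1 + 2 * (k : Int)).toNat = 2 * k + 1 := by omega
    rw [hk]
    simp [List.getElem?_cons_succ]

-- ===== VERDICT (by name: the statement is the Claim_ definition above) =====
theorem compute_n_houses_delivered_robo_spec : Claim_equal_compute_n_houses_delivered_robo := by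
  intro s _h
  unfold Spec_compute_n_houses_delivered_robo compute_n_houses_delivered_robo compute_n_houses_delivered_robo_alt
  rw [pvSliceEvens, pvSliceOdds]
  simp only [Option.getD_some]
  rw [pvFoldA]
  rw [if_pos (show PySem.Int.mod 0 2 = 0 from rfl)]
  have hlen : (PySem.Set.ofList (pvModelA s.toList (0, 0) (0, 0) [((0 : Int), (0 : Int))])).length =
      (PySem.Set.union (pvVisited (pvEvens s.toList)) (pvVisited (pvOdds s.toList))).length := by
    apply List.Perm.length_eq
    rw [List.perm_ext_iff_of_nodup (PySem.Set.nodup_ofList _)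
      (PySem.Set.nodup_union _ _ (pvVisited_nodup _))]
    intro y
    rw [PySem.Set.mem_ofList, PySem.Set.mem_union, pvMem_modelA, pvMem_visited, pvMem_visited]
    simp only [List.mem_singleton]
    tauto
  exact_mod_cast hlen
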